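-- pv_equiv track=rewrite | github.com/Vinix24/vnx-orchestration | tests/test_w5c_misc_cleanups.py | _compute_filtered_length
-- ===== SOURCE A (Python) =====
-- def _compute_filtered_length(events: list, phase_filter: str) -> int:
--     """Compute filtered event count from raw event list."""
--     tool_with_phase = []
--     current_phase = "other"
--     for ev in events:
--         if ev.get("type") == "phase_marker":
--             current_phase = ev.get("phase", "other")
--             continue
--         if ev.get("type") == "tool_use":
--             tool_with_phase.append({"phase": current_phase})
--     if phase_filter == "all":
--         return len(tool_with_phase)
--     return sum(1 for x in tool_with_phase if x["phase"] == phase_filter)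
-- ===== SOURCE B (Python) =====
-- def _compute_filtered_length(events: list, phase_filter: str) -> int:
--     """Split the stream into phase segments, then count tool_use in matching segments.
--
--     The "all" case needs no phase tracking at all: phase_marker events can never
--     be tool_use events, so the answer is just the number of tool_use events.
--     """
--     def tool(seg):
--         return sum(1 for e in seg if e.get("type") == "tool_use")
--
--     if phase_filter == "all":
--         return tool(events)
--     segments = []  # list of (phase, events-of-that-segment)
--     phase, cur = "other", []
--     for ev in events:
--         if ev.get("type") == "phase_marker":
--             segments.append((phase, cur))
--             phase, cur = ev.get("phase", "other"), []
--         else: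
--             cur.append(ev)
--     segments.append((phase, cur))
--     return sum(tool(seg) for p, seg in segments if p == phase_filter)
-- ===== Notes on version B (the rewrite author's own statement) =====
-- stated objective: alternative
-- what changed: B decomposes the problem by phase segments: the 'all' branch counts tool_use events directly with no phase tracking (markers can never be tool_use), and the filter branch first splits the stream into (phase, segment) groups at phase markers and then sums whole-segment tool_use counts only for segments whose phase matches, instead of A's per-event phase labelling into a list that is rescanned.
import Mathlib
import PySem

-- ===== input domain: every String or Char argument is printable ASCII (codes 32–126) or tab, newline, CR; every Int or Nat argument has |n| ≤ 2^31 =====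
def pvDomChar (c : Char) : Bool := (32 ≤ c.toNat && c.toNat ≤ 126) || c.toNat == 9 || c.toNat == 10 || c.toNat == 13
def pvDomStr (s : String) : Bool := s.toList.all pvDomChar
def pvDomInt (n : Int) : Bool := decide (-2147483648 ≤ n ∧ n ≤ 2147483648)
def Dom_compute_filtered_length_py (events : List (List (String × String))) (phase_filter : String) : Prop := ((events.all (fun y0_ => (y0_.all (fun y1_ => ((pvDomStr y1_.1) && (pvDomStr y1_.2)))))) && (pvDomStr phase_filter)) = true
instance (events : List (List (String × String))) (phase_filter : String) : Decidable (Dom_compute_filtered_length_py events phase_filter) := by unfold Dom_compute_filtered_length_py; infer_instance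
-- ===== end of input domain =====

-- B answers the "all" case by directly counting tool_use events, and the filter case by
-- splitting the stream into (phase, segment) groups at phase markers and summing whole-segment
-- counts for matching segments — an alternative decomposition of A's per-event labelling.


-- ===== PORT A =====
-- ev.get(k) / ev.get(k, d): Python dict lookup on the event (dicts arrive as pair lists)
def pvEvGet? (ev : List (String × String)) (k : String) : Option String :=
  (PySem.Dict.ofList ev).get? k

def pvEvGetD (ev : List (String × String)) (k : String) (d : String) : String :=
  ((PySem.Dict.ofList ev).get? k).getD d

-- the loop body of A: state = (tool_with_phase, current_phase)
def pvStepA (st : List (PySem.Dict String String) × String) (ev : List (String × String)) :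
    List (PySem.Dict String String) × String :=
  if pvEvGet? ev "type" = some "phase_marker" then (st.1, pvEvGetD ev "phase" "other")
  else if pvEvGet? ev "type" = some "tool_use" then
    (st.1 ++ [PySem.Dict.ofList [("phase", st.2)]], st.2)
  else st

def compute_filtered_length_py (events : List (List (String × String))) (phase_filter : String) : Int :=
  let st := events.foldl pvStepA ([], "other")
  if phase_filter = "all" then (st.1.length : Int)
  else st.1.foldl (fun acc x => if x.get? "phase" = some phase_filter then acc + 1 else acc) 0

-- ===== PORT B =====
-- tool(seg): sum(1 for e in seg if e.get("type") == "tool_use")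
def pvToolCount (seg : List (List (String × String))) : Int :=
  seg.foldl (fun acc e => if pvEvGet? e "type" = some "tool_use" then acc + 1 else acc) 0

-- the segment-splitting loop body of B: state = (segments, phase, cur)
def pvStepSeg
    (st : List (String × List (List (String × String))) × String × List (List (String × String)))
    (ev : List (String × String)) :
    List (String × List (List (String × String))) × String × List (List (String × String)) :=
  if pvEvGet? ev "type" = some "phase_marker" then
    (st.1 ++ [(st.2.1, st.2.2)], pvEvGetD ev "phase" "other", [])
  else (st.1, st.2.1, st.2.2 ++ [ev])

def compute_filtered_length_py_alt (events : List (List (String × String))) (phase_filter : String) : Int :=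
  if phase_filter = "all" then pvToolCount events
  else
    let st := events.foldl pvStepSeg ([], "other", [])
    let segments := st.1 ++ [(st.2.1, st.2.2)]
    segments.foldl (fun a pseg => if pseg.1 = phase_filter then a + pvToolCount pseg.2 else a) 0

-- ===== PRECONDITION & SPEC =====
def Spec_compute_filtered_length_py (events : List (List (String × String))) (phase_filter : String) (out : Int) : Prop := out = compute_filtered_length_py_alt events phase_filter
instance (events : List (List (String × String))) (phase_filter : String) (out : Int) : Decidable (Spec_compute_filtered_length_py events phase_filter out) := by unfold Spec_compute_filtered_length_py; infer_instance

-- ===== CLAIM (what is proved, stated in full; the proofs are below) =====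
def Claim_equal_compute_filtered_length_py : Prop := ∀ (events : List (List (String × String))) (phase_filter : String), Dom_compute_filtered_length_py events phase_filter → Spec_compute_filtered_length_py events phase_filter (compute_filtered_length_py events phase_filter)

-- ===== LEMMAS AND PROOFS =====
-- ghost sequence: the phase of each tool_use event, given the current phase
def pvGhost (events : List (List (String × String))) (cur : String) : List String :=
  match events with
  | [] => []
  | ev :: rest =>
    if pvEvGet? ev "type" = some "phase_marker" then pvGhost rest (pvEvGetD ev "phase" "other")
    else if pvEvGet? ev "type" = some "tool_use" then cur :: pvGhost rest cur
    else pvGhost rest cur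

lemma foldA_fst (events : List (List (String × String))) :
    ∀ (acc : List (PySem.Dict String String)) (cur : String),
    (events.foldl pvStepA (acc, cur)).1 =
      acc ++ (pvGhost events cur).map (fun p => PySem.Dict.ofList [("phase", p)]) := by
  induction events with
  | nil => intro acc cur; simp [pvGhost]
  | cons ev rest ih =>
    intro acc cur
    simp only [List.foldl_cons, pvStepA, pvGhost]
    split_ifs with h1 h2 <;> simp [ih]

lemma phase_get (x : String) : (PySem.Dict.ofList [("phase", x)]).get? "phase" = some x := by
  simp [PySem.Dict.ofList, PySem.Dict.get?, PySem.Dict.update, PySem.Dict.insert,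
    PySem.Dict.empty, PySem.Dict.contains]

lemma count_fold (xs : List String) (f : String) :
    ∀ (a : Int),
    (xs.map (fun p => PySem.Dict.ofList [("phase", p)])).foldl
      (fun acc x => if x.get? "phase" = some f then acc + 1 else acc) a
    = a + (xs.count f : Int) := by
  induction xs with
  | nil => intro a; simp
  | cons x xs ih =>
    intro a
    simp only [List.map_cons, List.foldl_cons, phase_get, Option.some.injEq, List.count_cons]
    by_cases h : x = f
    · simp [h, ih]; ring
    · simp [h, ih]

lemma toolCount_eq (seg : List (List (String × String))) :
    pvToolCount seg
      = ((seg.countP (fun e => decide (pvEvGet? e "type" = some "tool_use"))) : Int) := by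
  simpa [pvToolCount] using
    PySem.List.foldl_ite_add_one (p := fun e => pvEvGet? e "type" = some "tool_use")
      (l := seg) (a := (0 : Int))

lemma toolCount_append_singleton (seg : List (List (String × String))) (e : List (String × String)) :
    pvToolCount (seg ++ [e]) =
      pvToolCount seg + (if pvEvGet? e "type" = some "tool_use" then 1 else 0) := by
  rw [toolCount_eq, toolCount_eq, List.countP_append]
  split_ifs with h <;> simp [h]

-- the length of the ghost list is the number of tool_use events (markers are never tool_use)
lemma ghost_length (events : List (List (String × String))) :
    ∀ (cur : String), ((pvGhost events cur).length : Int) = pvToolCount events := by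
  induction events with
  | nil => intro cur; simp [pvGhost, pvToolCount]
  | cons ev rest ih =>
    intro cur
    have hstep : pvToolCount (ev :: rest)
        = (if pvEvGet? ev "type" = some "tool_use" then 1 else 0) + pvToolCount rest := by
      rw [toolCount_eq, toolCount_eq, List.countP_cons]
      by_cases h : pvEvGet? ev "type" = some "tool_use" <;> simp [h]; ring
    by_cases h1 : pvEvGet? ev "type" = some "phase_marker"
    · have h2 : ¬ pvEvGet? ev "type" = some "tool_use" := by simp [h1]
      rw [hstep, if_neg h2]
      simp only [pvGhost, if_pos h1]
      rw [ih]; ring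
    · by_cases h2 : pvEvGet? ev "type" = some "tool_use"
      · rw [hstep, if_pos h2]
        simp only [pvGhost, if_neg h1, if_pos h2, List.length_cons]
        push_cast
        rw [ih]; ring
      · rw [hstep, if_neg h2]
        simp only [pvGhost, if_neg h1, if_neg h2]
        rw [ih]; ring

-- sum over segments: foldl form vs filter+map+sum form
def pvSegSum (f : String) (l : List (String × List (List (String × String)))) : Int :=
  l.foldl (fun a pseg => if pseg.1 = f then a + pvToolCount pseg.2 else a) 0

lemma segSum_append_singleton (f : String) (l : List (String × List (List (String × String))))
    (p : String × List (List (String × String))) :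
    pvSegSum f (l ++ [p]) = pvSegSum f l + (if p.1 = f then pvToolCount p.2 else 0) := by
  simp only [pvSegSum, PySem.List.foldl_ite_eq_foldl_filter, List.filter_append,
    PySem.List.foldl_add]
  split_ifs with h <;> simp [h]

-- the main invariant: B's segment sum equals the filter-count over the ghost phase sequence
lemma foldSeg_sum (f : String) (events : List (List (String × String))) :
    ∀ (segs : List (String × List (List (String × String)))) (phase : String)
      (cur : List (List (String × String))),
    pvSegSum f ((events.foldl pvStepSeg (segs, phase, cur)).1
        ++ [((events.foldl pvStepSeg (segs, phase, cur)).2.1,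
             (events.foldl pvStepSeg (segs, phase, cur)).2.2)])
    = pvSegSum f segs + (if phase = f then pvToolCount cur else 0)
      + ((pvGhost events phase).count f : Int) := by
  induction events with
  | nil =>
    intro segs phase cur
    simp only [List.foldl_nil, pvGhost, List.count_nil]
    rw [segSum_append_singleton]
    simp
  | cons ev rest ih =>
    intro segs phase cur
    by_cases h1 : pvEvGet? ev "type" = some "phase_marker"
    · simp only [List.foldl_cons, pvStepSeg, pvGhost, if_pos h1]
      rw [ih, segSum_append_singleton]
      simp only [pvToolCount, List.foldl_nil, ite_self]
      rw [← pvToolCount]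
      ring
    · by_cases h2 : pvEvGet? ev "type" = some "tool_use"
      · simp only [List.foldl_cons, pvStepSeg, pvGhost, if_neg h1, if_pos h2]
        rw [ih, toolCount_append_singleton, if_pos h2, List.count_cons]
        by_cases hp : phase = f
        · simp only [hp, BEq.rfl, if_pos]
          push_cast
          ring
        · have hb : (phase == f) = false := by simpa using hp
          simp [hp, hb]
      · simp only [List.foldl_cons, pvStepSeg, pvGhost, if_neg h1, if_neg h2]
        rw [ih, toolCount_append_singleton, if_neg h2]
        simp

-- ===== VERDICT (by name: the statement is the Claim_ definition above) =====
theorem compute_filtered_length_py_spec : Claim_equal_compute_filtered_length_py := by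
  intro events phase_filter _
  unfold Spec_compute_filtered_length_py compute_filtered_length_py compute_filtered_length_py_alt
  split_ifs with h
  · simp only [foldA_fst, List.nil_append, List.length_map]
    exact ghost_length events "other"
  · have hseq := foldSeg_sum phase_filter events [] "other" []
    simp only [pvSegSum] at hseq
    simp only [foldA_fst, List.nil_append, count_fold, zero_add]
    rw [hseq]
    simp [pvToolCount]
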